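-- pv_equiv track=rewrite | github.com/tupkalenkodi/DONE | Final_7_February_2020/countries_DONE.py | mediators
-- ===== SOURCE A (Python) =====
-- def to_languages(countries):
--     new_dict = {}
--     keys = list(countries.keys())
--     values = list(countries.values())
--
--     for i in values:
--         for j in i:
--             if j not in new_dict:
--                 new_dict[j] = []
--
--     for k in keys:
--         for m in list(new_dict.keys()):
--             if m in countries[k]:
--                 new_dict[m].append(k)
--
--     return new_dict
--
-- def lets_talk(countries):
--     new_dict = {}
--     res_dict = {}
--
--     for i in list(countries.keys()):
--         new_dict[i] = []
--     for j in list(to_languages(countries).values()):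
--         for k in j:
--             new_dict[k] += j
--
--     keys = list(new_dict.keys())
--     for n in keys:
--         l_countries = list(set(new_dict[n]))
--         l_countries.remove(n)
--         if l_countries:
--             res_dict[n] = sorted(l_countries)
--
--     return res_dict
--
-- def mediators(countries, c_1, c_2):
--     if c_1 in lets_talk(countries).keys():
--         l_1 = lets_talk(countries)[c_1]
--     else:
--         return []
--
--     if c_2 in lets_talk(countries).keys():
--         l_2 = lets_talk(countries)[c_2]
--     else:
--         return []
--
--     res_l = []
--     for i in l_1:
--         if i in l_2:
--             res_l.append(i)
--
--     return res_l
-- ===== SOURCE B (Python) =====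
-- def mediators(countries, c_1, c_2):
--     def partners(c):
--         if c not in countries:
--             return set()
--         langs = set(countries[c])
--         return {k for k in countries
--                 if k != c and not langs.isdisjoint(countries[k])}
--     return sorted(partners(c_1) & partners(c_2))
-- ===== Notes on version B (the rewrite author's own statement) =====
-- stated objective: faster
-- what changed: Drops the to_languages/lets_talk all-pairs table building (which A recomputes on every lookup) and instead computes only the two needed neighbour sets partners(c_1) and partners(c_2) directly from the input dict, returning the sorted intersection.
import Mathlib
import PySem

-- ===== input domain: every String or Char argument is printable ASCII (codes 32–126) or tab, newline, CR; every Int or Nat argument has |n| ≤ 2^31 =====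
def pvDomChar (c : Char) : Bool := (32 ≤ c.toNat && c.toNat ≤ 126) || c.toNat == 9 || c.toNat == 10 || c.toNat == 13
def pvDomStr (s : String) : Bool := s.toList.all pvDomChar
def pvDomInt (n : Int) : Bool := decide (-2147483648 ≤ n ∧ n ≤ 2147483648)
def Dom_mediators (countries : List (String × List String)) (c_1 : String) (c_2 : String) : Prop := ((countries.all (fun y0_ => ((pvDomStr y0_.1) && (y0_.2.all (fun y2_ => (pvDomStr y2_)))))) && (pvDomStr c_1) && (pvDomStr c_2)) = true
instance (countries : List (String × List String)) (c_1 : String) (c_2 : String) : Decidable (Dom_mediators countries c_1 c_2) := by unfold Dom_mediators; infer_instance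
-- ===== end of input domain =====

-- B replaces A's 4-times-recomputed all-pairs lets_talk table by computing just the two
-- needed partner sets and sorting their intersection (objective: faster).

-- ===== PORT A =====
def toLanguagesA (d : PySem.Dict String (List String)) : PySem.Dict String (List String) :=
  let keys := d.keys
  let values := d.values
  let nd := values.foldl (fun nd i =>
    i.foldl (fun nd j => if nd.contains j then nd else nd.insert j ([] : List String)) nd)
    PySem.Dict.empty
  keys.foldl (fun nd k =>
    (nd.keys).foldl (fun nd' m =>
      if (d.getD k []).contains m then nd'.modify m [] (fun v => v ++ [k]) else nd') nd) nd

-- returns none exactly where Python's lets_talk raises ValueError (l_countries.remove(n))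
def letsTalkA? (d : PySem.Dict String (List String)) : Option (PySem.Dict String (List String)) :=
  let nd0 := d.keys.foldl (fun nd i => nd.insert i ([] : List String)) PySem.Dict.empty
  let nd := (toLanguagesA d).values.foldl (fun nd j =>
    j.foldl (fun nd k => nd.modify k [] (fun v => v ++ j)) nd) nd0
  d.keys.foldl (fun acc n =>
    match acc with
    | none => none
    | some res =>
      let lc := PySem.Set.ofList (nd.getD n [])
      match PySem.List.remove? lc n with
      | none => none
      | some lc' =>
        some (if lc'.isEmpty then res else res.insert n (PySem.List.sorted lc' (fun x => x) false)))
    (some PySem.Dict.empty)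

def mediators (countries : List (String × List String)) (c_1 : String) (c_2 : String) : List String :=
  let d := PySem.Dict.ofList countries
  match letsTalkA? d with
  | none => []  -- unreachable under Pre_mediators (Python raises here)
  | some t =>
    if t.contains c_1 then
      let l_1 := t.getD c_1 []
      if t.contains c_2 then
        let l_2 := t.getD c_2 []
        l_1.foldl (fun res i => if l_2.contains i then res ++ [i] else res) []
      else []
    else []

-- ===== PORT B =====
def partnersB (d : PySem.Dict String (List String)) (c : String) : PySem.Set String :=
  match d.get? c with
  | none => PySem.Set.empty
  | some cls =>
    let langs : PySem.Set String := PySem.Set.ofList cls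
    PySem.Set.ofList (d.keys.filter (fun k =>
      decide (k ≠ c) && !(PySem.Set.isdisjoint langs (d.getD k []))))

def mediators_alt (countries : List (String × List String)) (c_1 : String) (c_2 : String) : List String :=
  let d := PySem.Dict.ofList countries
  PySem.List.sorted (PySem.Set.inter (partnersB d c_1) (partnersB d c_2)) (fun x => x) false

-- ===== PRECONDITION & SPEC =====
-- Pre_ excludes the inputs where A raises ValueError: some country whose (dict-effective)
-- language list is empty (l_countries.remove(n) fails for it).
def Pre_mediators (countries : List (String × List String)) (c_1 : String) (c_2 : String) : Prop :=
  ∀ p ∈ (PySem.Dict.ofList countries).items, p.2 ≠ []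
instance (countries : List (String × List String)) (c_1 : String) (c_2 : String) : Decidable (Pre_mediators countries c_1 c_2) := by unfold Pre_mediators; infer_instance

def pvWitness_mediators : (List (String × List String)) × String × String :=
  ([("aa", ["x"]), ("bb", ["x", "y"]), ("cc", ["y"])], "aa", "cc")

def Spec_mediators (countries : List (String × List String)) (c_1 : String) (c_2 : String) (out : List String) : Prop := out = mediators_alt countries c_1 c_2
instance (countries : List (String × List String)) (c_1 : String) (c_2 : String) (out : List String) : Decidable (Spec_mediators countries c_1 c_2 out) := by unfold Spec_mediators; infer_instance

-- ===== CLAIM (what is proved, stated in full; the proofs are below) =====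
def Claim_equal_mediators : Prop := ∀ (countries : List (String × List String)) (c_1 : String) (c_2 : String), Dom_mediators countries c_1 c_2 → Pre_mediators countries c_1 c_2 → Spec_mediators countries c_1 c_2 (mediators countries c_1 c_2)


-- ===== LEMMAS AND PROOFS =====

-- Abbreviations used only by the proofs (below the claim block).

/-- The language group of `m`: countries listing language `m`, in key order. -/
def grpD (d : PySem.Dict String (List String)) (m : String) : List String :=
  d.keys.filter (fun k => (d.getD k []).contains m)

/-- The `new_dict` value of `lets_talk` (phase 1 + 2), as in `letsTalkA?`. -/
def ndD (d : PySem.Dict String (List String)) : PySem.Dict String (List String) :=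
  (toLanguagesA d).values.foldl (fun nd j =>
    j.foldl (fun nd k => nd.modify k [] (fun v => v ++ j)) nd)
    (d.keys.foldl (fun nd i => nd.insert i ([] : List String)) PySem.Dict.empty)

/-- The deduplicated talk list of `n` with `n` removed. -/
def lcD (d : PySem.Dict String (List String)) (n : String) : List String :=
  (PySem.Set.ofList ((ndD d).getD n [])).erase n

/-- The `lets_talk` entry of `n` (when non-empty). -/
def partD (d : PySem.Dict String (List String)) (n : String) : List String :=
  PySem.List.sorted (lcD d n) (fun x => x) false

-- ---- phase 1 of to_languages: conditional inserts of [] ----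

theorem p1_mem_keys (l : List String) (nd : PySem.Dict String (List String)) (x : String) :
    x ∈ (l.foldl (fun nd j => if nd.contains j then nd else nd.insert j ([] : List String)) nd).keys
      ↔ x ∈ nd.keys ∨ x ∈ l := by
  induction l generalizing nd with
  | nil => simp
  | cons j l ih =>
    simp only [List.foldl_cons, ih, List.mem_cons]
    by_cases h : nd.contains j = true
    · simp only [if_pos h]
      have hj : j ∈ nd.keys := (PySem.Dict.contains_iff_mem_keys nd j).1 h
      constructor
      · tauto
      · rintro (hx | rfl | hx) <;> tauto
    · simp only [if_neg h, PySem.Dict.mem_keys_insert]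
      tauto

theorem p1_getD (l : List String) (nd : PySem.Dict String (List String)) (x : String) :
    (l.foldl (fun nd j => if nd.contains j then nd else nd.insert j ([] : List String)) nd).getD x []
      = nd.getD x [] := by
  induction l generalizing nd with
  | nil => simp
  | cons j l ih =>
    simp only [List.foldl_cons, ih]
    by_cases h : nd.contains j = true
    · simp [h]
    · simp only [if_neg h, PySem.Dict.getD_insert]
      split
      · next hx => subst hx; exact (PySem.Dict.getD_of_not_contains nd [] (by simpa using h)).symm
      · rfl

theorem p1_keys_nodup (l : List String) (nd : PySem.Dict String (List String))
    (h : nd.keys.Nodup) :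
    (l.foldl (fun nd j => if nd.contains j then nd else nd.insert j ([] : List String)) nd).keys.Nodup := by
  induction l generalizing nd with
  | nil => simpa using h
  | cons j l ih =>
    simp only [List.foldl_cons]
    by_cases hc : nd.contains j = true
    · simpa [hc] using ih nd h
    · rw [if_neg hc]
      exact ih _ (PySem.Dict.nodup_keys_insert nd j [] h)

-- ---- phase 2 of to_languages: append k to each present language ----

theorem p2_inner_keys (d : PySem.Dict String (List String)) (k : String) (ks : List String)
    (nd : PySem.Dict String (List String)) (hsub : ∀ m ∈ ks, m ∈ nd.keys) :
    (ks.foldl (fun nd' m => if (d.getD k []).contains m then nd'.modify m [] (fun v => v ++ [k]) else nd') nd).keys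
      = nd.keys := by
  induction ks generalizing nd with
  | nil => simp
  | cons m ks ih =>
    simp only [List.foldl_cons]
    by_cases hc : (d.getD k []).contains m = true
    · rw [if_pos hc]
      have hk : (nd.modify m [] (fun v => v ++ [k])).keys = nd.keys := by
        rw [PySem.Dict.keys_modify, PySem.Dict.keys_insert_of_contains]
        exact (PySem.Dict.contains_iff_mem_keys nd m).2 (hsub m (List.mem_cons_self))
      rw [ih _ (fun m' hm' => by rw [hk]; exact hsub m' (List.mem_cons_of_mem _ hm')), hk]
    · rw [if_neg hc]
      exact ih nd (fun m' hm' => hsub m' (List.mem_cons_of_mem _ hm'))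

theorem p2_inner_getD (d : PySem.Dict String (List String)) (k : String) (ks : List String)
    (nd : PySem.Dict String (List String)) (hks : ks.Nodup) (x : String) :
    (ks.foldl (fun nd' m => if (d.getD k []).contains m then nd'.modify m [] (fun v => v ++ [k]) else nd') nd).getD x []
      = if x ∈ ks ∧ (d.getD k []).contains x then nd.getD x [] ++ [k] else nd.getD x [] := by
  induction ks generalizing nd with
  | nil => simp
  | cons m ks ih =>
    have hm : m ∉ ks := (List.nodup_cons.mp hks).1
    have hks' : ks.Nodup := (List.nodup_cons.mp hks).2
    simp only [List.foldl_cons]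
    by_cases hc : (d.getD k []).contains m = true
    · rw [if_pos hc, ih _ hks']
      by_cases hx : x = m
      · subst hx
        have hc' : x ∈ d.getD k [] := by simpa using hc
        simp [PySem.Dict.getD_modify, hm, hc']
      · simp [PySem.Dict.getD_modify, hx, List.mem_cons]
    · rw [if_neg hc, ih _ hks']
      by_cases hx : x = m
      · subst hx
        have hc' : x ∉ d.getD k [] := by simpa using hc
        simp [hc', hm]
      · simp [List.mem_cons, hx]

theorem p2_outer (d : PySem.Dict String (List String)) (kl : List String)
    (nd : PySem.Dict String (List String)) (h : nd.keys.Nodup) :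
    (kl.foldl (fun nd k =>
        (nd.keys).foldl (fun nd' m => if (d.getD k []).contains m then nd'.modify m [] (fun v => v ++ [k]) else nd') nd)
      nd).keys = nd.keys ∧
    ∀ x, (kl.foldl (fun nd k =>
        (nd.keys).foldl (fun nd' m => if (d.getD k []).contains m then nd'.modify m [] (fun v => v ++ [k]) else nd') nd)
      nd).getD x []
      = nd.getD x [] ++ (if x ∈ nd.keys then kl.filter (fun k => (d.getD k []).contains x) else []) := by
  induction kl generalizing nd with
  | nil => simp
  | cons k kl ih =>
    simp only [List.foldl_cons]
    have hkeys : ((nd.keys).foldl (fun nd' m => if (d.getD k []).contains m then nd'.modify m [] (fun v => v ++ [k]) else nd') nd).keys = nd.keys :=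
      p2_inner_keys d k nd.keys nd (fun m hm => hm)
    obtain ⟨ihk, ihg⟩ := ih (((nd.keys).foldl (fun nd' m => if (d.getD k []).contains m then nd'.modify m [] (fun v => v ++ [k]) else nd')) nd) (by rw [hkeys]; exact h)
    refine ⟨by rw [ihk, hkeys], fun x => ?_⟩
    rw [ihg x, hkeys, p2_inner_getD d k nd.keys nd h x]
    by_cases hx : x ∈ nd.keys
    · by_cases hcx : (d.getD k []).contains x = true
      · have hcx' : x ∈ d.getD k [] := by simpa using hcx
        simp [hx, hcx', List.filter_cons, List.append_assoc]
      · have hcx' : x ∉ d.getD k [] := by simpa using hcx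
        simp [hx, hcx', List.filter_cons]
    · simp [hx]

-- ---- to_languages characterised ----

def nd1D (d : PySem.Dict String (List String)) : PySem.Dict String (List String) :=
  (d.values.flatten).foldl (fun nd j => if nd.contains j then nd else nd.insert j ([] : List String)) PySem.Dict.empty

theorem tlA_eq (d : PySem.Dict String (List String)) :
    toLanguagesA d = d.keys.foldl (fun nd k =>
      (nd.keys).foldl (fun nd' m => if (d.getD k []).contains m then nd'.modify m [] (fun v => v ++ [k]) else nd') nd)
      (nd1D d) := by
  simp only [toLanguagesA, nd1D, List.foldl_flatten]

theorem nd1_keys_mem (d : PySem.Dict String (List String)) (x : String) :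
    x ∈ (nd1D d).keys ↔ x ∈ d.values.flatten := by
  simpa [PySem.Dict.keys_empty] using p1_mem_keys d.values.flatten PySem.Dict.empty x

theorem nd1_keys_nodup (d : PySem.Dict String (List String)) : (nd1D d).keys.Nodup :=
  p1_keys_nodup _ _ (by simp [PySem.Dict.keys_empty])

theorem nd1_getD (d : PySem.Dict String (List String)) (x : String) : (nd1D d).getD x [] = [] := by
  simpa [PySem.Dict.getD_empty] using p1_getD d.values.flatten PySem.Dict.empty x

theorem tl_keys (d : PySem.Dict String (List String)) : (toLanguagesA d).keys = (nd1D d).keys := by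
  rw [tlA_eq]
  exact (p2_outer d d.keys (nd1D d) (nd1_keys_nodup d)).1

theorem tl_keys_mem (d : PySem.Dict String (List String)) (x : String) :
    x ∈ (toLanguagesA d).keys ↔ x ∈ d.values.flatten := by
  rw [tl_keys]; exact nd1_keys_mem d x

theorem tl_keys_nodup (d : PySem.Dict String (List String)) :
    (toLanguagesA d).keys.Nodup := by
  rw [tl_keys]; exact nd1_keys_nodup d

theorem tl_getD (d : PySem.Dict String (List String)) (x : String) (hx : x ∈ (toLanguagesA d).keys) :
    (toLanguagesA d).getD x [] = grpD d x := by
  have hx' : x ∈ (nd1D d).keys := by rw [← tl_keys]; exact hx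
  rw [tlA_eq]
  rw [(p2_outer d d.keys (nd1D d) (nd1_keys_nodup d)).2 x, nd1_getD, if_pos hx']
  rfl

theorem tl_values_mem (d : PySem.Dict String (List String)) (g : List String) :
    g ∈ (toLanguagesA d).values ↔ ∃ m ∈ d.values.flatten, g = grpD d m := by
  rw [PySem.Dict.values_eq_map_keys (toLanguagesA d) (tl_keys_nodup d) []]
  simp only [List.mem_map]
  constructor
  · rintro ⟨m, hm, rfl⟩
    exact ⟨m, (tl_keys_mem d m).1 hm, tl_getD d m hm⟩
  · rintro ⟨m, hm, rfl⟩
    exact ⟨m, (tl_keys_mem d m).2 hm, tl_getD d m ((tl_keys_mem d m).2 hm)⟩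

-- ---- lets_talk new_dict characterised ----

theorem nd0_getD (l : List String) (nd : PySem.Dict String (List String))
    (h : ∀ x, nd.getD x [] = []) (x : String) :
    (l.foldl (fun nd i => nd.insert i ([] : List String)) nd).getD x [] = [] := by
  induction l generalizing nd with
  | nil => simpa using h x
  | cons i l ih =>
    simp only [List.foldl_cons]
    refine ih _ (fun y => ?_)
    rw [PySem.Dict.getD_insert]
    split
    · rfl
    · exact h y

theorem lt_inner_mem (j l : List String) (nd : PySem.Dict String (List String)) (n x : String) :
    x ∈ (l.foldl (fun nd k => nd.modify k [] (fun v => v ++ j)) nd).getD n []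
      ↔ x ∈ nd.getD n [] ∨ (n ∈ l ∧ x ∈ j) := by
  induction l generalizing nd with
  | nil => simp
  | cons k l ih =>
    simp only [List.foldl_cons, ih, List.mem_cons]
    by_cases hn : n = k
    · subst hn
      simp [PySem.Dict.getD_modify]
      tauto
    · simp only [PySem.Dict.getD_modify, if_neg hn]
      constructor
      · rintro (hx | ⟨hl, hj⟩) <;> tauto
      · rintro (hx | ⟨(rfl | hl), hj⟩) <;> tauto

theorem lt_outer_mem (gs : List (List String)) (nd : PySem.Dict String (List String)) (n x : String) :
    x ∈ (gs.foldl (fun nd j => j.foldl (fun nd k => nd.modify k [] (fun v => v ++ j)) nd) nd).getD n []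
      ↔ x ∈ nd.getD n [] ∨ ∃ g ∈ gs, n ∈ g ∧ x ∈ g := by
  induction gs generalizing nd with
  | nil => simp
  | cons g gs ih =>
    simp only [List.foldl_cons, ih, lt_inner_mem, List.mem_cons]
    constructor
    · rintro ((hx | ⟨hn, hg⟩) | ⟨g', hg', hn, hx⟩)
      · exact Or.inl hx
      · exact Or.inr ⟨g, Or.inl rfl, hn, hg⟩
      · exact Or.inr ⟨g', Or.inr hg', hn, hx⟩
    · rintro (hx | ⟨g', (rfl | hg'), hn, hx⟩)
      · exact Or.inl (Or.inl hx)
      · exact Or.inl (Or.inr ⟨hn, hx⟩)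
      · exact Or.inr ⟨g', hg', hn, hx⟩

theorem mem_values_of_mem_keys (d : PySem.Dict String (List String))
    (hnd : d.keys.Nodup) (n : String) (h : n ∈ d.keys) :
    d.getD n [] ∈ d.values := by
  rw [PySem.Dict.values_eq_map_keys d hnd []]
  exact List.mem_map_of_mem h

/-- Membership in the talk list: `x` talks to `n` iff both are countries sharing a language. -/
theorem nd_mem (d : PySem.Dict String (List String)) (hnd : d.keys.Nodup) (n x : String) :
    x ∈ (ndD d).getD n []
      ↔ n ∈ d.keys ∧ x ∈ d.keys ∧ ∃ m, m ∈ d.getD n [] ∧ m ∈ d.getD x [] := by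
  unfold ndD
  rw [lt_outer_mem]
  rw [nd0_getD d.keys PySem.Dict.empty (fun y => PySem.Dict.getD_empty y [])]
  simp only [List.not_mem_nil, false_or]
  constructor
  · rintro ⟨g, hg, hn, hx⟩
    obtain ⟨m, hmf, rfl⟩ := (tl_values_mem d g).1 hg
    simp only [grpD, List.mem_filter] at hn hx
    refine ⟨hn.1, hx.1, m, ?_, ?_⟩
    · simpa using hn.2
    · simpa using hx.2
  · rintro ⟨hn, hx, m, hm1, hm2⟩
    have hmf : m ∈ d.values.flatten :=
      List.mem_flatten.2 ⟨d.getD n [], mem_values_of_mem_keys d hnd n hn, hm1⟩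
    refine ⟨grpD d m, (tl_values_mem d (grpD d m)).2 ⟨m, hmf, rfl⟩, ?_, ?_⟩
    · simp only [grpD, List.mem_filter]
      exact ⟨hn, by simpa using hm1⟩
    · simp only [grpD, List.mem_filter]
      exact ⟨hx, by simpa using hm2⟩

-- ---- the result loop of lets_talk ----

theorem remove?_of_mem' (xs : List String) (v : String) (h : v ∈ xs) :
    PySem.List.remove? xs v = some (xs.erase v) := by
  cases hidx : List.idxOf? v xs with
  | none => exact absurd hidx (by simpa [List.idxOf?_eq_none_iff] using h)
  | some i => simp [PySem.List.remove?, hidx, List.erase_eq_eraseIdx]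

theorem res_fold (d : PySem.Dict String (List String)) (kl : List String)
    (res : PySem.Dict String (List String)) (h : ∀ n ∈ kl, n ∈ PySem.Set.ofList ((ndD d).getD n [])) :
    ∃ r, kl.foldl (fun acc n =>
      match acc with
      | none => none
      | some res =>
        let lc := PySem.Set.ofList ((ndD d).getD n [])
        match PySem.List.remove? lc n with
        | none => none
        | some lc' =>
          some (if lc'.isEmpty then res else res.insert n (PySem.List.sorted lc' (fun x => x) false)))
      (some res) = some r ∧
    ∀ x, r.get? x = if x ∈ kl ∧ lcD d x ≠ [] then some (partD d x) else res.get? x := by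
  induction kl generalizing res with
  | nil => exact ⟨res, rfl, fun x => by simp⟩
  | cons n kl ih =>
    have hn : n ∈ PySem.Set.ofList ((ndD d).getD n []) := h n List.mem_cons_self
    have hrm := remove?_of_mem' (PySem.Set.ofList ((ndD d).getD n [])) n hn
    obtain ⟨r, hr, hget⟩ := ih
      (if ((PySem.Set.ofList ((ndD d).getD n [])).erase n).isEmpty then res
       else res.insert n (PySem.List.sorted ((PySem.Set.ofList ((ndD d).getD n [])).erase n) (fun x => x) false))
      (fun n' h' => h n' (List.mem_cons_of_mem _ h'))
    refine ⟨r, ?_, ?_⟩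
    · rw [List.foldl_cons, ← hr]
      congr 1
      simp only [hrm]
    · intro x
      rw [hget x]
      by_cases hxkl : x ∈ kl
      · by_cases hne : lcD d x ≠ []
        · simp [hxkl, hne]
        · rw [if_neg (show ¬(x ∈ kl ∧ lcD d x ≠ []) from by tauto),
              if_neg (show ¬(x ∈ n :: kl ∧ lcD d x ≠ []) from by tauto)]
          split
          · rfl
          · next hemp =>
            have hne' : lcD d n ≠ [] := by
              intro hnil
              rw [List.isEmpty_iff] at hemp
              exact hemp hnil
            have hxn : x ≠ n := by
              intro hxe; subst hxe; exact hne' (by simpa using hne)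
            exact PySem.Dict.get?_insert_of_ne _ _ hxn
      · rw [if_neg (show ¬(x ∈ kl ∧ lcD d x ≠ []) from fun hc => hxkl hc.1)]
        by_cases hxn : x = n
        · subst hxn
          by_cases hnil : lcD d x = []
          · have hemp : ((PySem.Set.ofList ((ndD d).getD x [])).erase x).isEmpty = true := by
              rw [List.isEmpty_iff]; exact hnil
            rw [if_pos hemp, if_neg (show ¬(x ∈ x :: kl ∧ lcD d x ≠ []) from by simp [hnil])]
          · have hemp : ((PySem.Set.ofList ((ndD d).getD x [])).erase x).isEmpty = false := by
              rw [List.isEmpty_eq_false_iff]; exact hnil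
            rw [if_neg (show ¬((List.erase (PySem.Set.ofList ((ndD d).getD x [])) x).isEmpty = true) from by simp [hemp]),
              if_pos (show x ∈ x :: kl ∧ lcD d x ≠ [] from ⟨List.mem_cons_self, hnil⟩),
              PySem.Dict.get?_insert_self]
            rfl
        · rw [if_neg (show ¬(x ∈ n :: kl ∧ lcD d x ≠ []) from by simp [hxn, hxkl])]
          split
          · rfl
          · exact PySem.Dict.get?_insert_of_ne _ _ hxn

theorem letsTalkA?_eq (d : PySem.Dict String (List String)) (hnd : d.keys.Nodup)
    (hpre : ∀ n ∈ d.keys, d.getD n [] ≠ []) :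
    ∃ t, letsTalkA? d = some t ∧
      ∀ x, t.get? x = if x ∈ d.keys ∧ lcD d x ≠ [] then some (partD d x) else none := by
  have hmem : ∀ n ∈ d.keys, n ∈ PySem.Set.ofList ((ndD d).getD n []) := by
    intro n hn
    rw [PySem.Set.mem_ofList]
    obtain ⟨m, hm⟩ := List.exists_mem_of_ne_nil _ (hpre n hn)
    exact (nd_mem d hnd n n).2 ⟨hn, hn, m, hm, hm⟩
  obtain ⟨r, hr, hget⟩ := res_fold d d.keys PySem.Dict.empty hmem
  refine ⟨r, ?_, fun x => by rw [hget x, PySem.Dict.get?_empty]⟩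
  unfold letsTalkA?
  rw [← hr]
  rfl

-- ---- membership characterisations of both sides ----

theorem lcD_mem (d : PySem.Dict String (List String)) (hnd : d.keys.Nodup) (c x : String) :
    x ∈ lcD d c
      ↔ x ≠ c ∧ c ∈ d.keys ∧ x ∈ d.keys ∧ ∃ m, m ∈ d.getD c [] ∧ m ∈ d.getD x [] := by
  unfold lcD
  rw [List.Nodup.mem_erase_iff (PySem.Set.nodup_ofList _), PySem.Set.mem_ofList,
    nd_mem d hnd c x]

theorem lcD_nodup (d : PySem.Dict String (List String)) (c : String) : (lcD d c).Nodup := by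
  exact List.Nodup.erase _ (PySem.Set.nodup_ofList _)

theorem partnersB_mem (d : PySem.Dict String (List String)) (hnd : d.keys.Nodup) (c x : String) :
    x ∈ partnersB d c
      ↔ x ≠ c ∧ c ∈ d.keys ∧ x ∈ d.keys ∧ ∃ m, m ∈ d.getD c [] ∧ m ∈ d.getD x [] := by
  unfold partnersB
  cases hget : d.get? c with
  | none =>
    have hc : c ∉ d.keys := (PySem.Dict.get?_eq_none_iff_not_mem_keys d c).1 hget
    simp only [PySem.Set.empty]
    constructor
    · intro hx
      exact absurd hx (List.not_mem_nil)
    · rintro ⟨-, hc', -⟩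
      exact absurd hc' hc
  | some cls =>
    have hc : c ∈ d.keys := by
      by_contra hc
      rw [(PySem.Dict.get?_eq_none_iff_not_mem_keys d c).2 hc] at hget
      cases hget
    have hcls : d.getD c [] = cls := by
      rw [PySem.Dict.getD_eq_get?_getD, hget]
      rfl
    simp only [PySem.Set.mem_ofList, List.mem_filter, Bool.and_eq_true, decide_eq_true_eq,
      Bool.not_eq_true']
    constructor
    · rintro ⟨hxk, hxc, hdisj⟩
      have : ¬ (∀ m ∈ PySem.Set.ofList cls, m ∉ d.getD x []) := by
        intro hall
        rw [(PySem.Set.isdisjoint_iff _ _).2 hall] at hdisj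
        cases hdisj
      push Not at this
      obtain ⟨m, hm1, hm2⟩ := this
      rw [PySem.Set.mem_ofList] at hm1
      exact ⟨hxc, hc, hxk, m, hcls ▸ hm1, hm2⟩
    · rintro ⟨hxc, -, hxk, m, hm1, hm2⟩
      refine ⟨hxk, hxc, ?_⟩
      rw [Bool.eq_false_iff]
      intro hdisj
      exact (PySem.Set.isdisjoint_iff _ _).1 hdisj m (by rw [PySem.Set.mem_ofList, ← hcls]; exact hm1) hm2

theorem partnersB_nodup (d : PySem.Dict String (List String)) (c : String) :
    (partnersB d c : List String).Nodup := by
  unfold partnersB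
  cases d.get? c with
  | none => exact List.nodup_nil
  | some cls => exact PySem.Set.nodup_ofList _

/-- Two ≤-sorted nodup string lists with the same members are equal. -/
theorem sorted_nodup_ext (l₁ l₂ : List String)
    (h₁ : l₁.Pairwise (fun a b => a ≤ b)) (h₂ : l₂.Pairwise (fun a b => a ≤ b))
    (n₁ : l₁.Nodup) (n₂ : l₂.Nodup) (hm : ∀ x, x ∈ l₁ ↔ x ∈ l₂) : l₁ = l₂ := by
  exact List.Perm.eq_of_pairwise (fun a b _ _ hab hba => le_antisymm hab hba) h₁ h₂
    ((List.perm_ext_iff_of_nodup n₁ n₂).2 hm)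

theorem mediators_eval (countries : List (String × List String)) (c_1 c_2 : String)
    (t : PySem.Dict String (List String))
    (ht : letsTalkA? (PySem.Dict.ofList countries) = some t) :
    mediators countries c_1 c_2 =
      (if t.contains c_1 then
        (if t.contains c_2 then
          (t.getD c_1 []).foldl (fun res i => if (t.getD c_2 []).contains i then res ++ [i] else res) []
         else [])
       else []) := by
  unfold mediators
  simp only [ht]

theorem mediators_alt_eval (countries : List (String × List String)) (c_1 c_2 : String) :
    mediators_alt countries c_1 c_2 =
      PySem.List.sorted
        (PySem.Set.inter (partnersB (PySem.Dict.ofList countries) c_1)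
          (partnersB (PySem.Dict.ofList countries) c_2)) (fun x => x) false := rfl

-- ===== VERDICT (by name: the statement is the Claim_ definition above) =====
theorem mediators_spec : Claim_equal_mediators := by
  intro countries c_1 c_2 _ hpre
  unfold Spec_mediators
  unfold Pre_mediators at hpre
  have hnd : (PySem.Dict.ofList countries).keys.Nodup := PySem.Dict.nodup_keys_ofList countries
  set d := PySem.Dict.ofList countries with hd
  have hpre' : ∀ n ∈ d.keys, d.getD n [] ≠ [] := by
    intro n hn
    have hmem : (n, d.getD n []) ∈ d.items := by
      rw [PySem.Dict.items_eq_map_keys d hnd []]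
      exact List.mem_map_of_mem hn
    exact hpre _ hmem
  obtain ⟨t, ht, htget⟩ := letsTalkA?_eq d hnd hpre'
  rw [hd] at ht
  rw [mediators_eval countries c_1 c_2 t ht, mediators_alt_eval, ← hd]
  have hcontains : ∀ c, t.contains c = true ↔ (c ∈ d.keys ∧ lcD d c ≠ []) := by
    intro c
    rw [PySem.Dict.contains_eq_isSome_get?, htget c]
    by_cases hc : c ∈ d.keys ∧ lcD d c ≠ []
    · simp [hc]
    · simp [hc]
  have hempty : ∀ c, ¬ (c ∈ d.keys ∧ lcD d c ≠ []) → ∀ x, x ∉ partnersB d c := by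
    intro c hc x hx
    rw [partnersB_mem d hnd] at hx
    have hx' : x ∈ lcD d c := (lcD_mem d hnd c x).2 hx
    exact hc ⟨hx.2.1, List.ne_nil_of_mem hx'⟩
  by_cases h1 : t.contains c_1 = true
  · by_cases h2 : t.contains c_2 = true
    · have hc1 := (hcontains c_1).1 h1
      have hc2 := (hcontains c_2).1 h2
      rw [if_pos h1, if_pos h2]
      have hl1 : t.getD c_1 [] = partD d c_1 := by
        rw [PySem.Dict.getD_eq_get?_getD, htget c_1, if_pos hc1]
        rfl
      have hl2 : t.getD c_2 [] = partD d c_2 := by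
        rw [PySem.Dict.getD_eq_get?_getD, htget c_2, if_pos hc2]
        rfl
      rw [hl1, hl2,
        PySem.List.foldl_append_if (fun i => (partD d c_2).contains i) (fun i => i) (partD d c_1) []]
      simp only [List.nil_append, List.map_id_fun', id]
      apply sorted_nodup_ext
      · exact List.Pairwise.filter _ (PySem.List.sorted_pairwise _ _)
      · exact PySem.List.sorted_pairwise _ _
      · exact List.Nodup.filter _
          ((PySem.List.sorted_perm (lcD d c_1) (fun x => x) false).nodup_iff.2 (lcD_nodup d c_1))
      · exact (PySem.List.sorted_perm _ (fun x => x) false).nodup_iff.2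
          (PySem.Set.nodup_inter _ _ (partnersB_nodup d c_1))
      · intro x
        simp [List.mem_filter, PySem.List.mem_sorted, PySem.Set.mem_inter, partD,
          lcD_mem d hnd, partnersB_mem d hnd]
    · rw [if_pos h1, if_neg h2]
      have h2' := hempty c_2 (fun hc => h2 ((hcontains c_2).2 hc))
      have : PySem.Set.inter (partnersB d c_1) (partnersB d c_2) = ([] : List String) := by
        rw [List.eq_nil_iff_forall_not_mem]
        intro x hx
        exact h2' x ((PySem.Set.mem_inter _ _ x).1 hx).2
      rw [this]
      rfl
  · rw [if_neg h1]
    have h1' := hempty c_1 (fun hc => h1 ((hcontains c_1).2 hc))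
    have : PySem.Set.inter (partnersB d c_1) (partnersB d c_2) = ([] : List String) := by
      rw [List.eq_nil_iff_forall_not_mem]
      intro x hx
      exact h1' x ((PySem.Set.mem_inter _ _ x).1 hx).1
    rw [this]
    rfl
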